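-- pv_equiv track=rewrite | github.com/jgrey4296/doot | bkmkorg/io/twitter_automator.py | dfs_chains
-- ===== SOURCE A (Python) =====
-- def dfs_chains(graph, roots):
--     results = []
--     queue = [[x] for x in roots]
--     discovered = set()
--     while bool(queue):
--         path = queue.pop()
--         discovered.update(path)
--         if path[-1] not in graph:
--             results.append(path)
--             continue
--         edges = [x for x in graph[path[-1]].keys() if x not in discovered]
--         if not bool(edges):
--             results.append(path)
--         else:
--             queue += [path + [x] for x in edges]
--
--     return results
-- ===== SOURCE B (Python) =====
-- def dfs_chains(graph, roots):
--     results = []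
--     discovered = set()
--
--     def visit(path):
--         discovered.update(path)
--         last = path[-1]
--         if last not in graph:
--             results.append(path)
--             return
--         edges = [x for x in graph[last].keys() if x not in discovered]
--         if not edges:
--             results.append(path)
--             return
--         for x in reversed(edges):
--             visit(path + [x])
--
--     for x in reversed(roots):
--         visit([x])
--     return results
-- ===== Notes on version B (the rewrite author's own statement) =====
-- stated objective: alternative
-- what changed: The explicit LIFO work-stack of whole paths is replaced by a recursive depth-first visit(path) helper that shares the discovered set and results accumulator; iterating roots and edges in reverse reproduces the stack's pop order exactly, so the returned chain list is identical.
import Mathlib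
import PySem

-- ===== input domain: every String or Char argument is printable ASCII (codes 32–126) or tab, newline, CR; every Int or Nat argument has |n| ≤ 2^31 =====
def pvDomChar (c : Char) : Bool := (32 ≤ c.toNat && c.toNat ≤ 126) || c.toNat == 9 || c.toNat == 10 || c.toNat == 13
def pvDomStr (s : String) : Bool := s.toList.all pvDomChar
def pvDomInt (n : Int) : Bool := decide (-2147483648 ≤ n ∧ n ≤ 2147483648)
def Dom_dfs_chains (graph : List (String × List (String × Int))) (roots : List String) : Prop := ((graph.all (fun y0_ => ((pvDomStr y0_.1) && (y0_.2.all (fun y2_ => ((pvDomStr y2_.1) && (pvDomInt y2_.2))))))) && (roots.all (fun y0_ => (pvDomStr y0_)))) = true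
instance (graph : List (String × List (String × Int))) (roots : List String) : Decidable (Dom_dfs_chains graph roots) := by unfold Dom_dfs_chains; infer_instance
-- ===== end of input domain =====

-- B replaces A's explicit LIFO work-stack of paths by a recursive depth-first visit helper
-- (roots and edges iterated in reverse), an alternative decomposition with the same cost.
-- Both ports carry a fuel argument purely as a totality guard; with the fuel below it never
-- runs out (one unit per pop / per visit call; #pops ≤ |roots| + Σ adjacency lengths).
def dfsFuel (graph : List (String × List (String × Int))) (roots : List String) : Nat :=
  roots.length + graph.foldl (fun a p => a + p.2.length) 0 + 1

-- ===== PORT A =====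
-- literal transliteration of A: while queue: path = queue.pop(); discovered.update(path);
-- membership test `path[-1] not in graph` and the subsequent `graph[path[-1]]` are the one
-- first-match lookup on the association list; one fuel unit per loop iteration (pop).
def dfsGoA (graph : List (String × List (String × Int))) :
    Nat → List (List String) → PySem.Set String → List (List String) → List (List String)
  | 0, _, _, results => results
  | Nat.succ n, queue, discovered, results =>
    match PySem.List.pop? queue with
    | none => results                           -- while bool(queue) is false
    | some (path, queue) =>
      let discovered := PySem.Set.update discovered path
      let last := PySem.List.pyGetD path (-1) ""   -- path[-1]; paths are never empty
      match List.lookup last graph with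
      | none => dfsGoA graph n queue discovered (results ++ [path])
      | some adj =>
        let edges := (adj.map Prod.fst).filter (fun x => !PySem.Set.contains discovered x)
        if edges = [] then dfsGoA graph n queue discovered (results ++ [path])
        else dfsGoA graph n (queue ++ edges.map (fun x => path ++ [x])) discovered results

def dfs_chains (graph : List (String × List (String × Int))) (roots : List String) : List (List String) :=
  dfsGoA graph (dfsFuel graph roots) (roots.map (fun x => [x])) PySem.Set.empty []

-- ===== PORT B =====
-- literal transliteration of B's recursive visit(path): entry does discovered.update(path),
-- terminal paths are appended, otherwise the for-loop over reversed(edges) is the foldl;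
-- the driver for-loop over reversed(roots) is visitChildren with the empty path, since
-- visit([] ++ [x]) = visit([x]).  The fuel argument and the `min st.2.2 n` cap are pure
-- totality guards (returned fuel is always ≤ supplied fuel, lemma visitB_fuel_le below,
-- so the cap never changes the value); one fuel unit per visit call.
def visitB (graph : List (String × List (String × Int))) :
    Nat → List String → PySem.Set String → List (List String) →
    (PySem.Set String × List (List String) × Nat)
  | 0, _, discovered, results => (discovered, results, 0)
  | Nat.succ n, path, discovered, results =>
    let discovered := PySem.Set.update discovered path
    let last := PySem.List.pyGetD path (-1) ""   -- path[-1]; paths are never empty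
    match List.lookup last graph with
    | none => (discovered, results ++ [path], n)
    | some adj =>
      let edges := (adj.map Prod.fst).filter (fun x => !PySem.Set.contains discovered x)
      if edges = [] then (discovered, results ++ [path], n)
      else edges.reverse.foldl
        (fun st x => visitB graph (min st.2.2 n) (path ++ [x]) st.1 st.2.1)
        (discovered, results, n)
  termination_by n => n
  decreasing_by exact Nat.lt_succ_of_le (min_le_right _ _)

-- the sequential visiting of a list of children x with path+[x], threading state and fuel
def visitChildren (graph : List (String × List (String × Int))) (n : Nat)
    (path : List String) (l : List String) (discovered : PySem.Set String)
    (results : List (List String)) : PySem.Set String × List (List String) × Nat :=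
  l.foldl (fun st x => visitB graph (min st.2.2 n) (path ++ [x]) st.1 st.2.1)
    (discovered, results, n)

def dfs_chains_alt (graph : List (String × List (String × Int))) (roots : List String) : List (List String) :=
  (visitChildren graph (dfsFuel graph roots) [] roots.reverse PySem.Set.empty []).2.1

-- ===== PRECONDITION & SPEC =====
def Spec_dfs_chains (graph : List (String × List (String × Int))) (roots : List String) (out : List (List String)) : Prop := out = dfs_chains_alt graph roots
instance (graph : List (String × List (String × Int))) (roots : List String) (out : List (List String)) : Decidable (Spec_dfs_chains graph roots out) := by unfold Spec_dfs_chains; infer_instance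

-- ===== CLAIM (what is proved, stated in full; the proofs are below) =====
def Claim_equal_dfs_chains : Prop := ∀ (graph : List (String × List (String × Int))) (roots : List String), Dom_dfs_chains graph roots → Spec_dfs_chains graph roots (dfs_chains graph roots)

-- ===== LEMMAS AND PROOFS =====

-- unfolding lemmas for the well-founded definition of visitB
theorem visitB_zero (graph : List (String × List (String × Int)))
    (path : List String) (d : PySem.Set String) (r : List (List String)) :
    visitB graph 0 path d r = (d, r, 0) := by
  simp [visitB]

theorem visitB_succ (graph : List (String × List (String × Int))) (n : Nat)
    (path : List String) (d : PySem.Set String) (r : List (List String)) :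
    visitB graph (n + 1) path d r =
      (let discovered := PySem.Set.update d path
      match List.lookup (PySem.List.pyGetD path (-1) "") graph with
      | none => (discovered, r ++ [path], n)
      | some adj =>
        let edges := (adj.map Prod.fst).filter (fun x => !PySem.Set.contains discovered x)
        if edges = [] then (discovered, r ++ [path], n)
        else visitChildren graph n path edges.reverse discovered r) := by
  rw [visitB]; rfl

-- fuel returned by a capped foldl of visits never exceeds the initial fuel
theorem foldl_fuel_le (graph : List (String × List (String × Int))) (N : Nat)
    (hB : ∀ m, m ≤ N → ∀ (p : List String) d r, (visitB graph m p d r).2.2 ≤ m) :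
    ∀ (l : List String) (cap : Nat), cap ≤ N → ∀ (m : Nat), m ≤ cap →
      ∀ (path : List String) (d : PySem.Set String) (r : List (List String)),
      (l.foldl (fun st x => visitB graph (min st.2.2 cap) (path ++ [x]) st.1 st.2.1)
        (d, r, m)).2.2 ≤ m := by
  intro l
  induction l with
  | nil => intro cap hcap m hm path d r; simp
  | cons x xs ih =>
    intro cap hcap m hm path d r
    simp only [List.foldl_cons]
    rw [min_eq_left hm]
    have h1 : (visitB graph m (path ++ [x]) d r).2.2 ≤ m := hB m (le_trans hm hcap) _ _ _
    exact le_trans (ih cap hcap _ (le_trans h1 hm) path _ _) h1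

-- fuel returned by visitB never exceeds the fuel supplied
theorem visitB_fuel_le (graph : List (String × List (String × Int))) :
    ∀ (n : Nat) (path : List String) (d : PySem.Set String) (r : List (List String)),
      (visitB graph n path d r).2.2 ≤ n := by
  intro n
  induction n using Nat.strong_induction_on with
  | _ n IH =>
    intro path d r
    cases n with
    | zero => simp [visitB_zero]
    | succ k =>
      rw [visitB_succ]
      cases List.lookup (PySem.List.pyGetD path (-1) "") graph with
      | none => simp
      | some adj =>
        simp only
        split
        · simp
        · exact le_trans
            (foldl_fuel_le graph k (fun m hm p d' r' => IH m (Nat.lt_succ_of_le hm) p d' r')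
              _ k le_rfl k le_rfl path _ _) (Nat.le_succ k)

-- a capped foldl of visits with enough cap is exactly visitChildren at its initial fuel
theorem foldl_cap_eq (graph : List (String × List (String × Int))) :
    ∀ (l : List String) (m cap : Nat), m ≤ cap →
      ∀ (path : List String) (d : PySem.Set String) (r : List (List String)),
      l.foldl (fun st x => visitB graph (min st.2.2 cap) (path ++ [x]) st.1 st.2.1) (d, r, m)
        = visitChildren graph m path l d r := by
  intro l
  induction l with
  | nil => intro m cap hm path d r; simp [visitChildren]
  | cons x xs ih =>
    intro m cap hm path d r
    have hfuel := visitB_fuel_le graph m (path ++ [x]) d r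
    simp only [List.foldl_cons, visitChildren]
    rw [min_eq_left hm, min_self]
    rw [ih _ cap (le_trans hfuel hm) path _ _, ih _ m hfuel path _ _]

theorem visitChildren_nil (graph : List (String × List (String × Int))) (n : Nat)
    (path : List String) (d : PySem.Set String) (r : List (List String)) :
    visitChildren graph n path [] d r = (d, r, n) := rfl

theorem visitChildren_cons (graph : List (String × List (String × Int))) (n : Nat)
    (path : List String) (x : String) (xs : List String)
    (d : PySem.Set String) (r : List (List String)) :
    visitChildren graph n path (x :: xs) d r =
      (fun t => visitChildren graph t.2.2 path xs t.1 t.2.1)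
        (visitB graph n (path ++ [x]) d r) := by
  have hfuel := visitB_fuel_le graph n (path ++ [x]) d r
  simp only [visitChildren, List.foldl_cons, min_self]
  exact foldl_cap_eq graph xs _ n hfuel path _ _

-- A's loop does nothing on an empty queue
theorem dfsGoA_nil (graph : List (String × List (String × Int)))
    (n : Nat) (d : PySem.Set String) (r : List (List String)) :
    dfsGoA graph n [] d r = r := by
  cases n <;> simp [dfsGoA, PySem.List.pop?]

-- the stack/recursion correspondence at fuel n: popping the path pushed on top of q and
-- running A's loop = one recursive visit of that path, then A's loop on q with the
-- resulting discovered set, results and remaining fuel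
def MainEq (graph : List (String × List (String × Int))) (n : Nat) : Prop :=
  ∀ path q d r, dfsGoA graph n (q ++ [path]) d r =
    (fun t => dfsGoA graph t.2.2 q t.1 t.2.1) (visitB graph n path d r)

-- popping the children pushed for `path` one by one = visiting them in reverse order
theorem auxEq (graph : List (String × List (String × Int))) (N : Nat)
    (H : ∀ m, m ≤ N → MainEq graph m) :
    ∀ (l : List String) (m : Nat), m ≤ N → ∀ path q d r,
      dfsGoA graph m (q ++ l.reverse.map (fun x => path ++ [x])) d r =
        (fun t => dfsGoA graph t.2.2 q t.1 t.2.1) (visitChildren graph m path l d r) := by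
  intro l
  induction l with
  | nil => intro m hm path q d r; simp [visitChildren_nil]
  | cons x xs ih =>
    intro m hm path q d r
    have hmap : (x :: xs).reverse.map (fun y => path ++ [y]) =
        xs.reverse.map (fun y => path ++ [y]) ++ [path ++ [x]] := by simp
    rw [hmap, ← List.append_assoc,
      H m hm (path ++ [x]) (q ++ xs.reverse.map (fun y => path ++ [y])) d r,
      visitChildren_cons]
    exact ih _ (le_trans (visitB_fuel_le graph m (path ++ [x]) d r) hm) path q _ _

-- the correspondence itself, at every fuel
theorem mainEq (graph : List (String × List (String × Int))) : ∀ n, MainEq graph n := by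
  intro n
  induction n using Nat.strong_induction_on with
  | _ n IH =>
    cases n with
    | zero => intro path q d r; simp [dfsGoA, visitB_zero]
    | succ k =>
      intro path q d r
      rw [visitB_succ]
      simp only [dfsGoA, PySem.List.pop?_last]
      cases List.lookup (PySem.List.pyGetD path (-1) "") graph with
      | none => simp
      | some adj =>
        simp only
        split
        · simp
        · have h := auxEq graph k (fun m hm => IH m (Nat.lt_succ_of_le hm))
            (((adj.map Prod.fst).filter
              (fun x => !PySem.Set.contains (PySem.Set.update d path) x)).reverse)
            k le_rfl path q (PySem.Set.update d path) r
          simpa using h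

-- ===== VERDICT (by name: the statement is the Claim_ definition above) =====
theorem dfs_chains_spec : Claim_equal_dfs_chains := by
  intro graph roots _
  show dfs_chains graph roots = dfs_chains_alt graph roots
  unfold dfs_chains dfs_chains_alt
  have h := auxEq graph (dfsFuel graph roots) (fun m _ => mainEq graph m)
    roots.reverse (dfsFuel graph roots) le_rfl [] [] PySem.Set.empty []
  simp only [List.reverse_reverse, List.nil_append] at h
  rw [h, dfsGoA_nil]
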